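-- pv_equiv track=rewrite | github.com/hyeongrokheo/baekjoon | solved/[17779] 게리맨더링 2.py | do_elec
-- ===== SOURCE A (Python) =====
-- def do_elec(N, board, x, y, d1, d2):
--     new_board = [[0 for _ in range(N)] for _ in range(N)]
--
--     for r in range(N):
--         for c in range(N):
--             if 0 <= r < x + d1 and 0 <= c <= y:
--                 new_board[r][c] = 1
--             elif 0 <= r <= x + d2 and y < c < N:
--                 new_board[r][c] = 2
--             elif x + d1 <= r < N and 0 <= c < y - d1 + d2:
--                 new_board[r][c] = 3
--             elif x + d2 < r < N and y - d1 + d2 <= c < N: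
--                 new_board[r][c] = 4
--
--     r, left, right = x, y, y+1
--
--     for new_r in range(r, N):
--         for new_c in range(left, right):
--             new_board[new_r][new_c] = 5
--
--         d1 -= 1
--         d2 -= 1
--         if d1 >= 0:
--             left -= 1
--         else:
--             left += 1
--
--         if d2 >= 0:
--             right += 1
--         else:
--             right -= 1
--
--     elec_result = [0, 0, 0, 0, 0]
--     for r in range(N):
--         for c in range(N):
--             elec_result[new_board[r][c] - 1] += board[r][c]
--     return max(elec_result) - min(elec_result)
-- ===== SOURCE B (Python) =====
-- def do_elec(N, board, x, y, d1, d2):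
--     # One fused pass: the district of each cell is computed directly; district 5's
--     # per-row column interval is the closed form of A's incremental left/right sweep.
--     res = [0, 0, 0, 0, 0]
--     for r in range(N):
--         for c in range(N):
--             if r >= x and y - d1 + abs(r - x - d1) <= c < y + 1 + d2 - abs(r - x - d2):
--                 d = 5
--             elif r < x + d1 and c <= y:
--                 d = 1
--             elif r <= x + d2 and y < c:
--                 d = 2
--             elif x + d1 <= r and c < y - d1 + d2:
--                 d = 3
--             elif x + d2 < r and y - d1 + d2 <= c:
--                 d = 4
--             else:
--                 d = 5
--             res[d - 1] += board[r][c]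
--     return max(res) - min(res)
-- ===== Notes on version B (the rewrite author's own statement) =====
-- stated objective: simpler
-- what changed: Drops the N x N new_board and the stateful left/right sweep entirely: one fused pass computes each cell's district directly, with district 5 given by a closed-form per-row column interval (y-d1+|r-x-d1| <= c < y+1+d2-|r-x-d2|) instead of the incremental sweep, accumulating straight into the five buckets.
-- outside the precondition, e.g. on do_elec(3, [[1, 2, 3], [4, 5, 6], [7, 8, 9]], 0, 0, 2, 0): A returns 21, B returns 35; on do_elec(2, [[1, 2], [3, 4]], -1, 0, 1, 1): A returns 6, B returns 6
import Mathlib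
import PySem

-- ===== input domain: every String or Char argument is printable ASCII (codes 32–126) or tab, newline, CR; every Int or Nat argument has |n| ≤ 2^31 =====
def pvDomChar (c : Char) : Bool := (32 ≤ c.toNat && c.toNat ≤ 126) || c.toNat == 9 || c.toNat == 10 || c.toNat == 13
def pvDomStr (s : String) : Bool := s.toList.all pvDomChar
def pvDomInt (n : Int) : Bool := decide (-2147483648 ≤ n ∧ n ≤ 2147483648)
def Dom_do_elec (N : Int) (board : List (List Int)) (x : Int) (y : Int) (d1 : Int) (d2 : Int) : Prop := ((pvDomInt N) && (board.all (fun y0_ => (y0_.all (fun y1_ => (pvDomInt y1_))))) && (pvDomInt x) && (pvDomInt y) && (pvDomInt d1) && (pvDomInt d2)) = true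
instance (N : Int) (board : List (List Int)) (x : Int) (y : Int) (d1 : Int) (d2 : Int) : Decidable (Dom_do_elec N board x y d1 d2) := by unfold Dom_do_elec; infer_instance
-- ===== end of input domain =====

-- B drops A's N×N scratch board and incremental left/right sweep: one fused pass computes each
-- cell's district directly (district 5 via a closed-form per-row column interval) — simpler, O(1) space.

-- ===== PORT A =====
-- Python `b[r][c] = v` / `b[r][c]`: negative indices count from the end; an out-of-range access,
-- an IndexError in Python, is modelled as a no-op / default here and is excluded by Pre_.
def pvSetCell (b : List (List Int)) (r c v : Int) : List (List Int) :=
  PySem.List.pySetD b r (PySem.List.pySetD (PySem.List.pyGetD b r []) c v)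

def pvGetCell (b : List (List Int)) (r c : Int) : Int :=
  PySem.List.pyGetD (PySem.List.pyGetD b r []) c 0

-- body of A's first nested loop (the if/elif chain painting districts 1–4)
def pvPhase1Step (N x y d1 d2 r : Int) (b : List (List Int)) (c : Int) : List (List Int) :=
  if 0 ≤ r ∧ r < x + d1 ∧ 0 ≤ c ∧ c ≤ y then pvSetCell b r c 1
  else if 0 ≤ r ∧ r ≤ x + d2 ∧ y < c ∧ c < N then pvSetCell b r c 2
  else if x + d1 ≤ r ∧ r < N ∧ 0 ≤ c ∧ c < y - d1 + d2 then pvSetCell b r c 3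
  else if x + d2 < r ∧ r < N ∧ y - d1 + d2 ≤ c ∧ c < N then pvSetCell b r c 4
  else b

-- body of A's sweep loop; state = (new_board, d1, d2, left, right)
def pvSweepStep (st : List (List Int) × Int × Int × Int × Int) (new_r : Int) :
    List (List Int) × Int × Int × Int × Int :=
  let b := (PySem.List.pyRange st.2.2.2.1 st.2.2.2.2 1).foldl
             (fun b new_c => pvSetCell b new_r new_c 5) st.1
  let d1 := st.2.1 - 1
  let d2 := st.2.2.1 - 1
  let left := if d1 ≥ 0 then st.2.2.2.1 - 1 else st.2.2.2.1 + 1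
  let right := if d2 ≥ 0 then st.2.2.2.2 + 1 else st.2.2.2.2 - 1
  (b, d1, d2, left, right)

def do_elec (N : Int) (board : List (List Int)) (x : Int) (y : Int) (d1 : Int) (d2 : Int) : Int :=
  let new_board : List (List Int) :=
    (PySem.List.pyRange 0 N 1).map (fun _ => (PySem.List.pyRange 0 N 1).map (fun _ => (0 : Int)))
  let new_board :=
    (PySem.List.pyRange 0 N 1).foldl
      (fun b r => (PySem.List.pyRange 0 N 1).foldl (pvPhase1Step N x y d1 d2 r) b) new_board
  let st := (PySem.List.pyRange x N 1).foldl pvSweepStep (new_board, d1, d2, y, y + 1)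
  let new_board := st.1
  let elec_result :=
    (PySem.List.pyRange 0 N 1).foldl
      (fun e r =>
        (PySem.List.pyRange 0 N 1).foldl
          (fun e c =>
            PySem.List.pySetD e (pvGetCell new_board r c - 1)
              (PySem.List.pyGetD e (pvGetCell new_board r c - 1) 0 + pvGetCell board r c)) e)
      [0, 0, 0, 0, 0]
  (PySem.List.max? elec_result (fun v => v)).getD 0 - (PySem.List.min? elec_result (fun v => v)).getD 0

-- ===== PORT B =====
-- the if/elif chain of Source B computing a cell's district number
def pvDistrict (x y d1 d2 r c : Int) : Int :=
  if x ≤ r ∧ y - d1 + |r - x - d1| ≤ c ∧ c < y + 1 + d2 - |r - x - d2| then 5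
  else if r < x + d1 ∧ c ≤ y then 1
  else if r ≤ x + d2 ∧ y < c then 2
  else if x + d1 ≤ r ∧ c < y - d1 + d2 then 3
  else if x + d2 < r ∧ y - d1 + d2 ≤ c then 4
  else 5

def do_elec_alt (N : Int) (board : List (List Int)) (x : Int) (y : Int) (d1 : Int) (d2 : Int) : Int :=
  let res :=
    (PySem.List.pyRange 0 N 1).foldl
      (fun res r =>
        (PySem.List.pyRange 0 N 1).foldl
          (fun res c =>
            let d := pvDistrict x y d1 d2 r c
            PySem.List.pySetD res (d - 1)
              (PySem.List.pyGetD res (d - 1) 0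
                + PySem.List.pyGetD (PySem.List.pyGetD board r []) c 0)) res)
      [0, 0, 0, 0, 0]
  (PySem.List.max? res (fun v => v)).getD 0 - (PySem.List.min? res (fun v => v)).getD 0

-- ===== PRECONDITION & SPEC =====
-- Pre_ admits any board whose first N rows have ≥ N entries (else A raises IndexError), and
-- either x ≥ N (the district-5 sweep loop is empty) or sweep parameters whose column window
-- stays inside [0,N); outside it A raises IndexError or (on malformed geometry no caller of
-- this contest solution supplies) returns a value shaped by negative-index wraparound of the
-- sweep's writes, which B does not mimic.
def Pre_do_elec (N : Int) (board : List (List Int)) (x : Int) (y : Int) (d1 : Int) (d2 : Int) : Prop :=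
  N ≤ (board.length : Int) ∧ (∀ row ∈ board.take N.toNat, N ≤ (row.length : Int)) ∧
  (N ≤ x ∨ (0 ≤ x ∧ 0 ≤ d1 ∧ 0 ≤ d2 ∧ d1 ≤ y ∧ y + d2 ≤ N - 1))
instance (N : Int) (board : List (List Int)) (x : Int) (y : Int) (d1 : Int) (d2 : Int) : Decidable (Pre_do_elec N board x y d1 d2) := by unfold Pre_do_elec; infer_instance

def pvWitness_do_elec : Int × List (List Int) × Int × Int × Int × Int :=
  (4, [[1, 2, 3, 4], [5, 6, 7, 8], [9, 1, 2, 3], [4, 5, 6, 7]], 0, 1, 1, 1)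

def Spec_do_elec (N : Int) (board : List (List Int)) (x : Int) (y : Int) (d1 : Int) (d2 : Int) (out : Int) : Prop := out = do_elec_alt N board x y d1 d2
instance (N : Int) (board : List (List Int)) (x : Int) (y : Int) (d1 : Int) (d2 : Int) (out : Int) : Decidable (Spec_do_elec N board x y d1 d2 out) := by unfold Spec_do_elec; infer_instance

-- ===== CLAIM (what is proved, stated in full; the proofs are below) =====
def Claim_equal_do_elec : Prop := ∀ (N : Int) (board : List (List Int)) (x : Int) (y : Int) (d1 : Int) (d2 : Int), Dom_do_elec N board x y d1 d2 → Pre_do_elec N board x y d1 d2 → Spec_do_elec N board x y d1 d2 (do_elec N board x y d1 d2)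

-- ===== LEMMAS AND PROOFS =====

-- table representation of an N×N board
def pvTbl (N : Int) (f : Int → Int → Int) : List (List Int) :=
  (PySem.List.pyRange 0 N 1).map (fun r => (PySem.List.pyRange 0 N 1).map (fun c => f r c))

-- A's chain painting districts 1–4 (value 0 = untouched)
def pvChain (N x y d1 d2 r c : Int) : Int :=
  if 0 ≤ r ∧ r < x + d1 ∧ 0 ≤ c ∧ c ≤ y then 1
  else if 0 ≤ r ∧ r ≤ x + d2 ∧ y < c ∧ c < N then 2
  else if x + d1 ≤ r ∧ r < N ∧ 0 ≤ c ∧ c < y - d1 + d2 then 3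
  else if x + d2 < r ∧ r < N ∧ y - d1 + d2 ≤ c ∧ c < N then 4
  else 0

-- closed forms of the sweep's left/right bounds at row r
def pvLF (x y d1 r : Int) : Int := y - d1 + ((r - x - d1).natAbs : Int)
def pvRF (x y d2 r : Int) : Int := y + 1 + d2 - ((r - x - d2).natAbs : Int)

-- the final content of A's new_board
def pvFinal (N x y d1 d2 r c : Int) : Int :=
  if x ≤ r ∧ pvLF x y d1 r ≤ c ∧ c < pvRF x y d2 r then 5 else pvChain N x y d1 d2 r c

theorem pvTbl_congr {N : Int} {f g : Int → Int → Int}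
    (h : ∀ r c, 0 ≤ r → r < N → 0 ≤ c → c < N → f r c = g r c) : pvTbl N f = pvTbl N g := by
  unfold pvTbl
  apply List.map_congr_left
  intro r hr
  rw [PySem.List.mem_pyRange_one] at hr
  apply List.map_congr_left
  intro c hc
  rw [PySem.List.mem_pyRange_one] at hc
  exact h r c hr.1 hr.2 hc.1 hc.2

theorem pvGetCell_tbl {N : Int} {f : Int → Int → Int} {r c : Int}
    (hr0 : 0 ≤ r) (hrN : r < N) (hc0 : 0 ≤ c) (hcN : c < N) :
    pvGetCell (pvTbl N f) r c = f r c := by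
  unfold pvGetCell pvTbl
  rw [PySem.List.pyGetD_map_pyRange_of_nonneg _ _ _ _ hr0 hrN,
      PySem.List.pyGetD_map_pyRange_of_nonneg _ _ _ _ hc0 hcN]

theorem pvRow_set {α : Type} {N : Int} (g : Int → α) {c : Int} (hc0 : 0 ≤ c) (hcN : c < N) (v : α) :
    PySem.List.pySetD ((PySem.List.pyRange 0 N 1).map g) c v
      = (PySem.List.pyRange 0 N 1).map (fun c' => if c' = c then v else g c') := by
  rw [PySem.List.pySetD_of_nonneg _ _ hc0]
  apply List.ext_getElem
  · simp
  · intro k hk1 hk2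
    simp only [List.getElem_set, List.getElem_map, PySem.List.getElem_pyRange_one]
    have hkN : (k : Int) < N := by
      have := hk2
      simp [PySem.List.length_pyRange_one] at this
      omega
    by_cases h : c.toNat = k
    · rw [if_pos h, if_pos (by omega)]
    · rw [if_neg h, if_neg (by omega)]

theorem pvSetCell_tbl {N : Int} {f : Int → Int → Int} {r c : Int}
    (hr0 : 0 ≤ r) (hrN : r < N) (hc0 : 0 ≤ c) (hcN : c < N) (v : Int) :
    pvSetCell (pvTbl N f) r c v
      = pvTbl N (fun r' c' => if r' = r ∧ c' = c then v else f r' c') := by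
  unfold pvSetCell pvTbl
  rw [PySem.List.pyGetD_map_pyRange_of_nonneg _ _ _ _ hr0 hrN]
  rw [pvRow_set _ hc0 hcN]
  rw [pvRow_set _ hr0 hrN]
  apply List.map_congr_left
  intro r' hr'
  by_cases h : r' = r
  · rw [if_pos h]
    apply List.map_congr_left
    intro c' _
    by_cases h2 : c' = c
    · simp [h, h2]
    · simp [h, h2]
  · rw [if_neg h]
    apply List.map_congr_left
    intro c' _
    simp [h]

theorem pvFoldlWrite {N : Int} (L : List Int) {r : Int} (hr0 : 0 ≤ r) (hrN : r < N)
    (step : List (List Int) → Int → List (List Int))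
    (w : Int → Prop) [DecidablePred w] (g : Int → Int)
    (hL : ∀ c ∈ L, 0 ≤ c ∧ c < N)
    (hstep : ∀ b c, c ∈ L → step b c = if w c then pvSetCell b r c (g c) else b)
    (f : Int → Int → Int) :
    L.foldl step (pvTbl N f)
      = pvTbl N (fun r' c' => if r' = r ∧ c' ∈ L ∧ w c' then g c' else f r' c') := by
  induction L generalizing f with
  | nil => simp
  | cons a t ih =>
    have ha := hL a (List.mem_cons_self)
    rw [List.foldl_cons, hstep _ a (List.mem_cons_self)]
    by_cases hw : w a
    · rw [if_pos hw, pvSetCell_tbl hr0 hrN ha.1 ha.2]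
      rw [ih (fun c hc => hL c (List.mem_cons_of_mem _ hc))
            (fun b c hc => hstep b c (List.mem_cons_of_mem _ hc))]
      apply pvTbl_congr
      intro r' c' _ _ _ _
      by_cases h1 : r' = r <;> by_cases h2 : w c' <;> by_cases h3 : c' ∈ t <;>
        by_cases h4 : c' = a <;> simp_all [List.mem_cons]
    · rw [if_neg hw]
      rw [ih (fun c hc => hL c (List.mem_cons_of_mem _ hc))
            (fun b c hc => hstep b c (List.mem_cons_of_mem _ hc))]
      apply pvTbl_congr
      intro r' c' _ _ _ _
      by_cases h1 : r' = r <;> by_cases h2 : w c' <;> by_cases h3 : c' ∈ t <;>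
        by_cases h4 : c' = a <;> simp_all [List.mem_cons]

theorem pvFoldlRows {N : Int} (L : List Int)
    (step : List (List Int) → Int → List (List Int))
    (Q : Int → Int → Prop) [inst : ∀ r c, Decidable (Q r c)] (val : Int → Int → Int)
    (hstep : ∀ f r, r ∈ L →
      step (pvTbl N f) r = pvTbl N (fun r' c' => if r' = r ∧ Q r' c' then val r' c' else f r' c'))
    (f : Int → Int → Int) :
    L.foldl step (pvTbl N f)
      = pvTbl N (fun r' c' => if r' ∈ L ∧ Q r' c' then val r' c' else f r' c') := by
  induction L generalizing f with
  | nil => simp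
  | cons a t ih =>
    rw [List.foldl_cons, hstep f a (List.mem_cons_self)]
    rw [ih (fun f r hr => hstep f r (List.mem_cons_of_mem _ hr))]
    apply pvTbl_congr
    intro r' c' _ _ _ _
    by_cases h1 : Q r' c' <;> by_cases h2 : r' ∈ t <;> by_cases h3 : r' = a <;>
      simp_all [List.mem_cons]

-- phase 1: the first double loop produces the pvChain table
theorem pvPhase1_eq (N x y d1 d2 : Int) :
    (PySem.List.pyRange 0 N 1).foldl
      (fun b r => (PySem.List.pyRange 0 N 1).foldl (pvPhase1Step N x y d1 d2 r) b)
      ((PySem.List.pyRange 0 N 1).map (fun _ => (PySem.List.pyRange 0 N 1).map (fun _ => (0 : Int))))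
      = pvTbl N (pvChain N x y d1 d2) := by
  have hinit : ((PySem.List.pyRange 0 N 1).map
      (fun _ => (PySem.List.pyRange 0 N 1).map (fun _ => (0 : Int)))) = pvTbl N (fun _ _ => 0) := rfl
  rw [hinit]
  rw [pvFoldlRows (PySem.List.pyRange 0 N 1)
      (fun b r => (PySem.List.pyRange 0 N 1).foldl (pvPhase1Step N x y d1 d2 r) b)
      (fun r' c' => c' ∈ PySem.List.pyRange 0 N 1 ∧ pvChain N x y d1 d2 r' c' ≠ 0)
      (pvChain N x y d1 d2) ?_ (fun _ _ => 0)]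
  · apply pvTbl_congr
    intro r c hr0 hrN hc0 hcN
    beta_reduce
    by_cases h : pvChain N x y d1 d2 r c = 0
    · by_cases h2 : (r ∈ PySem.List.pyRange 0 N 1 ∧
          c ∈ PySem.List.pyRange 0 N 1 ∧ pvChain N x y d1 d2 r c ≠ 0) <;> simp_all
    · rw [if_pos ⟨PySem.List.mem_pyRange_one.mpr ⟨hr0, hrN⟩,
          PySem.List.mem_pyRange_one.mpr ⟨hc0, hcN⟩, h⟩]
  · intro f r hr
    rw [PySem.List.mem_pyRange_one] at hr
    beta_reduce
    rw [pvFoldlWrite (PySem.List.pyRange 0 N 1) hr.1 hr.2 (pvPhase1Step N x y d1 d2 r)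
        (fun c => pvChain N x y d1 d2 r c ≠ 0) (pvChain N x y d1 d2 r) ?_ ?_ f]
    · apply pvTbl_congr
      intro r' c' _ _ _ _
      beta_reduce
      by_cases h1 : r' = r
      · subst h1; rfl
      · rw [if_neg (by tauto), if_neg (by tauto)]
    · intro c hc
      rw [PySem.List.mem_pyRange_one] at hc
      exact hc
    · intro b c _
      unfold pvPhase1Step pvChain
      split_ifs <;> simp_all <;> omega
  
-- the sweep, from any row ≥ x, in closed form
theorem pvSweep_eq {N x y d1 d2 : Int} (hx : 0 ≤ x) (hd1 : 0 ≤ d1) (hd2 : 0 ≤ d2)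
    (hy1 : d1 ≤ y) (hy2 : y + d2 ≤ N - 1) :
    ∀ (n : Nat) (row : Int), (N - row).toNat ≤ n → x ≤ row → ∀ f : Int → Int → Int,
    ((PySem.List.pyRange row N 1).foldl pvSweepStep
      (pvTbl N f, d1 - (row - x), d2 - (row - x), pvLF x y d1 row, pvRF x y d2 row)).1
    = pvTbl N (fun r' c' =>
        if row ≤ r' ∧ pvLF x y d1 r' ≤ c' ∧ c' < pvRF x y d2 r' then 5 else f r' c') := by
  intro n
  induction n with
  | zero =>
    intro row hn hxr f
    rw [PySem.List.pyRange_one_eq_nil (by omega)]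
    simp only [List.foldl_nil]
    apply pvTbl_congr
    intro r' c' _ hr'N _ _
    beta_reduce
    rw [if_neg (by intro h; omega)]
  | succ n ih =>
    intro row hn hxr f
    by_cases hrow : row < N
    · rw [PySem.List.pyRange_one_cons hrow, List.foldl_cons]
      have hLbd : ∀ c ∈ PySem.List.pyRange (pvLF x y d1 row) (pvRF x y d2 row) 1,
          0 ≤ c ∧ c < N := by
        intro c hc
        rw [PySem.List.mem_pyRange_one] at hc
        unfold pvLF pvRF at hc
        omega
      have hb : (PySem.List.pyRange (pvLF x y d1 row) (pvRF x y d2 row) 1).foldl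
            (fun b new_c => pvSetCell b row new_c 5) (pvTbl N f)
          = pvTbl N (fun r' c' =>
              if r' = row ∧ pvLF x y d1 row ≤ c' ∧ c' < pvRF x y d2 row then 5 else f r' c') := by
        rw [pvFoldlWrite (PySem.List.pyRange (pvLF x y d1 row) (pvRF x y d2 row) 1)
            (by omega : (0:Int) ≤ row) hrow
            (fun b new_c => pvSetCell b row new_c 5) (fun _ => True) (fun _ => 5)
            hLbd (fun b c _ => by simp) f]
        apply pvTbl_congr
        intro r' c' _ _ _ _
        simp [PySem.List.mem_pyRange_one]
      have hstep : pvSweepStep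
            (pvTbl N f, d1 - (row - x), d2 - (row - x), pvLF x y d1 row, pvRF x y d2 row) row
          = (pvTbl N (fun r' c' =>
              if r' = row ∧ pvLF x y d1 row ≤ c' ∧ c' < pvRF x y d2 row then 5 else f r' c'),
             d1 - (row + 1 - x), d2 - (row + 1 - x), pvLF x y d1 (row + 1), pvRF x y d2 (row + 1)) := by
        unfold pvSweepStep
        simp only [hb]
        refine Prod.ext rfl (Prod.ext ?_ (Prod.ext ?_ (Prod.ext ?_ ?_))) <;> simp only
        · omega
        · omega
        · unfold pvLF; split_ifs <;> omega
        · unfold pvRF; split_ifs <;> omega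
      rw [hstep, ih (row + 1) (by omega) (by omega)]
      apply pvTbl_congr
      intro r' c' _ _ _ _
      beta_reduce
      by_cases h1 : r' = row
      · subst h1
        split_ifs <;> first | rfl | omega
      · split_ifs <;> first | rfl | omega
    · rw [PySem.List.pyRange_one_eq_nil (by omega)]
      simp only [List.foldl_nil]
      apply pvTbl_congr
      intro r' c' _ hr'N _ _
      beta_reduce
      rw [if_neg (by intro h; omega)]

-- fold congruence under an invariant of the accumulator
theorem pvFoldlCongrInv {α β : Type} (P : α → Prop) (l : List β) (f g : α → β → α) (init : α)
    (hP : P init) (hpres : ∀ a b, P a → b ∈ l → P (f a b))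
    (hfg : ∀ a b, P a → b ∈ l → f a b = g a b) :
    l.foldl f init = l.foldl g init := by
  induction l generalizing init with
  | nil => rfl
  | cons a t ih =>
    rw [List.foldl_cons, List.foldl_cons, ← hfg init a hP (List.mem_cons_self)]
    exact ih (f init a) (hpres init a hP (List.mem_cons_self))
      (fun a' b hPa hb => hpres a' b hPa (List.mem_cons_of_mem _ hb))
      (fun a' b hPa hb => hfg a' b hPa (List.mem_cons_of_mem _ hb))

theorem pvFoldlPres {α β : Type} (P : α → Prop) (l : List β) (f : α → β → α) (init : α)
    (hP : P init) (hpres : ∀ a b, P a → b ∈ l → P (f a b)) : P (l.foldl f init) := by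
  induction l generalizing init with
  | nil => exact hP
  | cons a t ih =>
    exact ih (f init a) (hpres init a hP (List.mem_cons_self))
      (fun a' b hPa hb => hpres a' b hPa (List.mem_cons_of_mem _ hb))

-- A's final board value versus B's district number
theorem pvFinal_vs_district {N x y d1 d2 r c : Int} (hx : 0 ≤ x) (hd1 : 0 ≤ d1) (hd2 : 0 ≤ d2)
    (hy1 : d1 ≤ y) (hy2 : y + d2 ≤ N - 1)
    (hr0 : 0 ≤ r) (hrN : r < N) (hc0 : 0 ≤ c) (hcN : c < N) :
    (pvFinal N x y d1 d2 r c = pvDistrict x y d1 d2 r c ∧ 1 ≤ pvFinal N x y d1 d2 r c) ∨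
    (pvFinal N x y d1 d2 r c = 0 ∧ pvDistrict x y d1 d2 r c = 5) := by
  unfold pvFinal pvDistrict pvChain pvLF pvRF
  simp only [Int.abs_eq_natAbs]
  split_ifs <;> omega

-- with x ≥ N the sweep is vacuous: A's board is pvChain, and B's diamond test never fires
theorem pvChain_vs_district {N x y d1 d2 r c : Int} (hNx : N ≤ x)
    (hr0 : 0 ≤ r) (hrN : r < N) (hc0 : 0 ≤ c) (hcN : c < N) :
    (pvChain N x y d1 d2 r c = pvDistrict x y d1 d2 r c ∧ 1 ≤ pvChain N x y d1 d2 r c) ∨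
    (pvChain N x y d1 d2 r c = 0 ∧ pvDistrict x y d1 d2 r c = 5) := by
  unfold pvDistrict pvChain
  simp only [Int.abs_eq_natAbs]
  split_ifs <;> omega

-- negative Python index -1 into a 5-element accumulator
theorem pvSetD_neg_one {e : List Int} (he : e.length = 5) (v : Int) :
    PySem.List.pySetD e (-1) v = PySem.List.pySetD e 4 v := by
  rcases e with _ | ⟨a1, _ | ⟨a2, _ | ⟨a3, _ | ⟨a4, _ | ⟨a5, rest⟩⟩⟩⟩⟩ <;>
    simp_all [PySem.List.pySetD, PySem.List.pySet?, PySem.List.pyIdx?]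

theorem pvGetD_neg_one {e : List Int} (he : e.length = 5) :
    PySem.List.pyGetD e (-1) 0 = PySem.List.pyGetD e 4 0 := by
  rcases e with _ | ⟨a1, _ | ⟨a2, _ | ⟨a3, _ | ⟨a4, _ | ⟨a5, rest⟩⟩⟩⟩⟩ <;>
    simp_all [PySem.List.pyGetD, PySem.List.pyGet?, PySem.List.pyIdx?]

-- the two accumulation folds agree whenever the final-board value and B's district number
-- index the same bucket on every cell
theorem pvAcc_eq (N x y d1 d2 : Int) (board : List (List Int)) (F : Int → Int → Int)
    (hFd : ∀ r c, 0 ≤ r → r < N → 0 ≤ c → c < N →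
      (F r c = pvDistrict x y d1 d2 r c ∧ 1 ≤ F r c) ∨
      (F r c = 0 ∧ pvDistrict x y d1 d2 r c = 5)) :
    (PySem.List.pyRange 0 N 1).foldl
      (fun e r =>
        (PySem.List.pyRange 0 N 1).foldl
          (fun e c =>
            PySem.List.pySetD e (pvGetCell (pvTbl N F) r c - 1)
              (PySem.List.pyGetD e (pvGetCell (pvTbl N F) r c - 1) 0
                + pvGetCell board r c)) e)
      ([0, 0, 0, 0, 0] : List Int)
    = (PySem.List.pyRange 0 N 1).foldl
      (fun res r =>
        (PySem.List.pyRange 0 N 1).foldl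
          (fun res c =>
            let d := pvDistrict x y d1 d2 r c
            PySem.List.pySetD res (d - 1)
              (PySem.List.pyGetD res (d - 1) 0
                + PySem.List.pyGetD (PySem.List.pyGetD board r []) c 0)) res)
      ([0, 0, 0, 0, 0] : List Int) := by
  apply pvFoldlCongrInv (fun e : List Int => e.length = 5)
  · rfl
  · intro e r he hr
    exact pvFoldlPres (fun e : List Int => e.length = 5) _ _ _ he
      (fun e' c he' _ => by simpa [PySem.List.length_pySetD] using he')
  · intro e r he hr
    rw [PySem.List.mem_pyRange_one] at hr
    apply pvFoldlCongrInv (fun e : List Int => e.length = 5) _ _ _ _ he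
      (fun e' c he' _ => by simpa [PySem.List.length_pySetD] using he')
    intro e' c he' hc
    rw [PySem.List.mem_pyRange_one] at hc
    simp only
    rw [pvGetCell_tbl hr.1 hr.2 hc.1 hc.2]
    rcases hFd r c hr.1 hr.2 hc.1 hc.2 with ⟨heq, _⟩ | ⟨h0, h5⟩
    · rw [heq]; rfl
    · rw [h0, h5]
      norm_num
      rw [pvSetD_neg_one he', pvGetD_neg_one he']
      rfl

-- ===== VERDICT (by name: the statement is the Claim_ definition above) =====
theorem do_elec_spec : Claim_equal_do_elec := by
  intro N board x y d1 d2 _ hpre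
  obtain ⟨hblen, hbrows, hgeo⟩ := hpre
  unfold Spec_do_elec do_elec do_elec_alt
  simp only []
  rcases hgeo with htriv | ⟨hx, hd1, hd2, hy1, hy2⟩
  · -- x ≥ N: the sweep loop body never runs
    have hboard : ((PySem.List.pyRange x N 1).foldl pvSweepStep
        ((PySem.List.pyRange 0 N 1).foldl
          (fun b r => (PySem.List.pyRange 0 N 1).foldl (pvPhase1Step N x y d1 d2 r) b)
          ((PySem.List.pyRange 0 N 1).map
            (fun _ => (PySem.List.pyRange 0 N 1).map (fun _ => (0 : Int)))),
         d1, d2, y, y + 1)).1 = pvTbl N (pvChain N x y d1 d2) := by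
      rw [pvPhase1_eq, PySem.List.pyRange_one_eq_nil htriv]
      rfl
    rw [hboard, pvAcc_eq N x y d1 d2 board (pvChain N x y d1 d2)
      (fun r c hr0 hrN hc0 hcN => pvChain_vs_district htriv hr0 hrN hc0 hcN)]
  · -- valid sweep geometry: the sweep in closed form
    have hboard : ((PySem.List.pyRange x N 1).foldl pvSweepStep
        ((PySem.List.pyRange 0 N 1).foldl
          (fun b r => (PySem.List.pyRange 0 N 1).foldl (pvPhase1Step N x y d1 d2 r) b)
          ((PySem.List.pyRange 0 N 1).map
            (fun _ => (PySem.List.pyRange 0 N 1).map (fun _ => (0 : Int)))),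
         d1, d2, y, y + 1)).1 = pvTbl N (pvFinal N x y d1 d2) := by
      rw [pvPhase1_eq]
      have h1 : d1 - (x - x) = d1 := by ring
      have h2 : d2 - (x - x) = d2 := by ring
      have h3 : pvLF x y d1 x = y := by unfold pvLF; omega
      have h4 : pvRF x y d2 x = y + 1 := by unfold pvRF; omega
      have := pvSweep_eq hx hd1 hd2 hy1 hy2 (N - x).toNat x (le_refl _) (le_refl x)
        (pvChain N x y d1 d2)
      rw [h1, h2, h3, h4] at this
      rw [this]
      rfl
    rw [hboard, pvAcc_eq N x y d1 d2 board (pvFinal N x y d1 d2)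
      (fun r c hr0 hrN hc0 hcN => pvFinal_vs_district hx hd1 hd2 hy1 hy2 hr0 hrN hc0 hcN)]
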